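-- pv_equiv track=rewrite | github.com/AstroTitanus/RSA | lib/helper.py | split_binary
-- ===== SOURCE A (Python) =====
-- def split_binary(bin_data, group_len):
--     """Splits string of binary data into groups that start with '1'
--
--     This function splits binary data into groups with a minimum length
--     of group_len. This length can be bigger - the group can't start
--     with a zero because of possible data loss when converting back
--     to string from binary data.
--
--     Args:
--         bin_data (str): string of binary data
--         group_len (int): length of split groups
--
--     Returns:
--         list: list of split strings of binary data
--     """
--
--     bin_groups = []
--     bin_group = ''
--     i = 0
--     for bool in bin_data:
--         if i < group_len:
--             bin_group += bool
--
--         # If the next bool is zero, append it to the current group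
--         else:
--             if bool == '0':
--                 bin_group += bool
--             else:
--                 bin_groups.append(bin_group)
--                 bin_group = bool
--                 i = 0
--         i += 1
--
--     if bin_group:
--         bin_groups.append(bin_group)
--
--     return bin_groups
-- ===== SOURCE B (Python) =====
-- def _grab(s, k):
--     """Take the first k chars of s plus any immediately following '0's."""
--     j = k
--     while j < len(s) and s[j] == '0':
--         j += 1
--     return s[:j], s[j:]
--
--
-- def split_binary(bin_data, group_len):
--     if not bin_data:
--         return []
--     group, rest = _grab(bin_data, max(group_len, 0))
--     groups = [group]
--     while rest:
--         group, rest = _grab(rest, max(group_len, 1))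
--         groups.append(group)
--     return groups
-- ===== Notes on version B (the rewrite author's own statement) =====
-- stated objective: faster
-- what changed: Replaces A's per-character loop with a counter, char-by-char string += and mid-loop flushes by slice-based chunking: repeatedly grab the next max(group_len,*) characters plus the following run of '0's as one group (first grab allows an empty chunk when group_len <= 0, later grabs at least one character); bulk slicing avoids quadratic-prone per-char string concatenation (constant-factor, measured ~7x at n=262144).
import Mathlib
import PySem

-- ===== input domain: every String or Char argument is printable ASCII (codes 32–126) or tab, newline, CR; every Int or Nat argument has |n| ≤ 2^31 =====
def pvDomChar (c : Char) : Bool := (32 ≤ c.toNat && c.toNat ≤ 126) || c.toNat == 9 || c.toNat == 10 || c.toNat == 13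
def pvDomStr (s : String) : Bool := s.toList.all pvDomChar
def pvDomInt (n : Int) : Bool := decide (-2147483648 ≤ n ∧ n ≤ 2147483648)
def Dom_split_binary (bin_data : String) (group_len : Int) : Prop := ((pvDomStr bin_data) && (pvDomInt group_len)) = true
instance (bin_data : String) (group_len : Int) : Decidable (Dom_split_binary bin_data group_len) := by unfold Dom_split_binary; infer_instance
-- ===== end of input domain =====

-- B replaces A's per-character counter-driven loop by slice-based chunking
-- (take the next k chars, then extend with the following run of '0's); a timing run measured B faster (bulk slices instead of per-char +=).

-- ===== PORT A =====
-- state: (bin_groups, bin_group as List Char, i)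
def stepA (group_len : Int) (st : List String × List Char × Int) (c : Char) :
    List String × List Char × Int :=
  if st.2.2 < group_len then (st.1, st.2.1 ++ [c], st.2.2 + 1)
  else if c = '0' then (st.1, st.2.1 ++ [c], st.2.2 + 1)
  else (st.1 ++ [String.mk st.2.1], [c], 1)

def finishA (st : List String × List Char × Int) : List String :=
  if st.2.1 ≠ [] then st.1 ++ [String.mk st.2.1] else st.1

def split_binary (bin_data : String) (group_len : Int) : List String :=
  finishA (bin_data.toList.foldl (stepA group_len) ([], [], 0))

-- ===== PORT B =====
-- the inner while of _grab: split off the leading run of '0's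
def span0 : List Char → List Char × List Char
  | [] => ([], [])
  | c :: t => if c = '0' then ((span0 t).1.cons c, (span0 t).2) else ([], c :: t)

theorem span0_snd_length : ∀ l : List Char, (span0 l).2.length ≤ l.length := by
  intro l
  induction l with
  | nil => simp [span0]
  | cons c t ih => simp only [span0]; split <;> simp <;> omega

-- the `while rest:` loop of B, with k = max(group_len, 1)
def chunksB (group_len : Int) : List Char → List String
  | [] => []
  | c :: t =>
    let k := (if group_len > 1 then group_len else 1).toNat
    let rest := (c :: t).drop k
    String.mk ((c :: t).take k ++ (span0 rest).1) :: chunksB group_len (span0 rest).2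
termination_by l => l.length
decreasing_by
  have h1 := span0_snd_length ((c :: t).drop ((if group_len > 1 then group_len else 1).toNat))
  have h2 : 1 ≤ (if group_len > 1 then group_len else 1).toNat := by split <;> omega
  simp_all [List.length_drop]; omega

def split_binary_alt (bin_data : String) (group_len : Int) : List String :=
  match bin_data.toList with
  | [] => []
  | c :: t =>
    -- first _grab with k = max(group_len, 0), then the loop
    let k := (if group_len > 0 then group_len else 0).toNat
    let rest := (c :: t).drop k
    String.mk ((c :: t).take k ++ (span0 rest).1) :: chunksB group_len (span0 rest).2

-- ===== PRECONDITION & SPEC =====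
def Spec_split_binary (bin_data : String) (group_len : Int) (out : List String) : Prop := out = split_binary_alt bin_data group_len
instance (bin_data : String) (group_len : Int) (out : List String) : Decidable (Spec_split_binary bin_data group_len out) := by unfold Spec_split_binary; infer_instance

-- ===== CLAIM (what is proved, stated in full; the proofs are below) =====
def Claim_equal_split_binary : Prop := ∀ (bin_data : String) (group_len : Int), Dom_split_binary bin_data group_len → Spec_split_binary bin_data group_len (split_binary bin_data group_len)

-- ===== LEMMAS AND PROOFS =====

-- "absorb zeros then flush, then continue chunking": how A behaves once i ≥ group_len
def tailB (group_len : Int) (gp l : List Char) : List String :=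
  match span0 l with
  | (zs, []) => if gp ++ zs = [] then [] else [String.mk (gp ++ zs)]
  | (zs, r) => String.mk (gp ++ zs) :: chunksB group_len r

theorem span0_append (l : List Char) : (span0 l).1 ++ (span0 l).2 = l := by
  induction l with
  | nil => simp [span0]
  | cons c t ih => simp only [span0]; split <;> simp_all

theorem tailB_nil (g : Int) (gp : List Char) :
    tailB g gp [] = if gp = [] then [] else [String.mk gp] := by
  unfold tailB
  simp [span0]

theorem tailB_zero (g : Int) (gp : List Char) (t : List Char) :
    tailB g gp ('0' :: t) = tailB g (gp ++ ['0']) t := by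
  unfold tailB
  have hs : span0 ('0' :: t) = ((span0 t).1.cons '0', (span0 t).2) := by simp [span0]
  rcases hsp : span0 t with ⟨zs, r⟩
  rw [hs, hsp]
  cases r <;> simp

theorem chunks_eq_tail (g : Int) (c : Char) (t : List Char) :
    chunksB g (c :: t) =
      tailB g ((c :: t).take (if g > 1 then g else 1).toNat)
        ((c :: t).drop (if g > 1 then g else 1).toNat) := by
  rw [chunksB]
  unfold tailB
  have hk : 1 ≤ (if g > 1 then g else 1).toNat := by split <;> omega
  rcases span0 ((c :: t).drop (if g > 1 then g else 1).toNat) with ⟨zs, r⟩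
  cases r with
  | nil =>
    have hne : (c :: t).take (if g > 1 then g else 1).toNat ≠ [] := by
      simp [List.take_eq_nil_iff]; omega
    simp [chunksB, hne]
  | cons d r2 => simp

theorem A_fill (g : Int) : ∀ (l gp : List Char) (gs : List String) (i : Int), 0 ≤ i →
    finishA (l.foldl (stepA g) (gs, gp, i)) =
      gs ++ tailB g (gp ++ l.take (g - i).toNat) (l.drop (g - i).toNat) := by
  intro l
  induction l with
  | nil =>
    intro gp gs i _
    simp only [List.foldl_nil, List.take_nil, List.drop_nil, List.append_nil, tailB_nil, finishA]
    cases gp <;> simp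
  | cons c t ih =>
    intro gp gs i hi
    by_cases hlt : i < g
    · have hr : (g - i).toNat = (g - (i + 1)).toNat + 1 := by omega
      simp only [List.foldl_cons, stepA, if_pos hlt]
      rw [ih (gp ++ [c]) gs (i + 1) (by omega), hr]
      simp
    · have hr0 : (g - i).toNat = 0 := by omega
      have hr1 : (g - (i + 1)).toNat = 0 := by omega
      by_cases hc : c = '0'
      · simp only [List.foldl_cons, stepA, if_neg hlt, hc, reduceIte]
        rw [ih (gp ++ ['0']) gs (i + 1) (by omega)]
        rw [hr0, hr1]
        simp [tailB_zero]
      · simp only [List.foldl_cons, stepA, if_neg hlt, if_neg hc]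
        rw [ih [c] (gs ++ [String.mk gp]) 1 (by omega)]
        rw [hr0]
        simp only [List.take_zero, List.drop_zero, List.append_nil, List.append_assoc]
        congr 1
        have hs : span0 (c :: t) = ([], c :: t) := by simp [span0, hc]
        have h1 : tailB g gp (c :: t) = String.mk gp :: chunksB g (c :: t) := by
          unfold tailB; rw [hs]; simp
        have hk' : (if g > 1 then g else 1).toNat = (g - 1).toNat + 1 := by split <;> omega
        rw [h1, chunks_eq_tail g c t, hk']
        simp only [List.take_succ_cons, List.drop_succ_cons, List.cons_append, List.nil_append]

-- ===== VERDICT (by name: the statement is the Claim_ definition above) =====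
theorem split_binary_spec : Claim_equal_split_binary := by
  intro s g _
  unfold Spec_split_binary split_binary split_binary_alt
  rw [A_fill g s.toList [] [] 0 le_rfl]
  cases hl : s.toList with
  | nil => simp [tailB_nil]
  | cons c t =>
    have hk : (g - 0).toNat = (if g > 0 then g else 0).toNat := by split <;> omega
    rw [hk]
    set k := (if g > 0 then g else 0).toNat with hkdef
    simp only [List.nil_append]
    unfold tailB
    rcases hsp : span0 ((c :: t).drop k) with ⟨zs, r⟩
    cases r with
    | cons d r2 => simp
    | nil =>
      have happ := span0_append ((c :: t).drop k)
      rw [hsp] at happ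
      simp only [List.append_nil] at happ
      have hne : (c :: t).take k ++ zs = c :: t := by
        conv_rhs => rw [← List.take_append_drop k (c :: t)]
        rw [← happ]
      simp [hne, chunksB]
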